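-- pv_equiv track=rewrite | github.com/jihyukma123/mcp | server.py | _normalize_planet
-- ===== SOURCE A (Python) =====
-- PLANETS = [
--     "Mercury",
--     "Venus",
--     "Earth",
--     "Mars",
--     "Jupiter",
--     "Saturn",
--     "Uranus",
--     "Neptune",
-- ]
--
-- PLANET_ALIASES = {
--     "terra": "Earth",
--     "gaia": "Earth",
--     "soliii": "Earth",
--     "tellus": "Earth",
--     "ares": "Mars",
--     "jove": "Jupiter",
--     "zeus": "Jupiter",
--     "cronus": "Saturn",
--     "ouranos": "Uranus",
--     "poseidon": "Neptune",
-- }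
--
-- DEFAULT_PLANET = "Earth"
--
-- def _normalize_planet(name: str) -> str | None:
--     if not name:
--         return DEFAULT_PLANET
--
--     key = name.strip().lower()
--     if not key:
--         return DEFAULT_PLANET
--
--     clean = ''.join(ch for ch in key if ch.isalnum())
--
--     for planet in PLANETS:
--         planet_key = ''.join(ch for ch in planet.lower() if ch.isalnum())
--         if clean == planet_key or key == planet.lower():
--             return planet
--
--     alias = PLANET_ALIASES.get(clean)
--     if alias:
--         return alias
--
--     for planet in PLANETS:
--         planet_key = ''.join(ch for ch in planet.lower() if ch.isalnum())
--         if planet_key.startswith(clean):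
--             return planet
--
--     return None
-- ===== SOURCE B (Python) =====
-- PLANETS = [
--     "Mercury",
--     "Venus",
--     "Earth",
--     "Mars",
--     "Jupiter",
--     "Saturn",
--     "Uranus",
--     "Neptune",
-- ]
--
-- PLANET_ALIASES = {
--     "terra": "Earth",
--     "gaia": "Earth",
--     "soliii": "Earth",
--     "tellus": "Earth",
--     "ares": "Mars",
--     "jove": "Jupiter",
--     "zeus": "Jupiter",
--     "cronus": "Saturn",
--     "ouranos": "Uranus",
--     "poseidon": "Neptune",
-- }
--
-- DEFAULT_PLANET = "Earth"
--
-- # Hash-index re-implementation: the scans over PLANETS are replaced by two dicts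
-- # built once at module load: _EXACT maps each planet's alnum-stripped lowercase key
-- # to the planet, and _PREFIX maps EVERY prefix of every planet key to the first
-- # planet (in PLANETS order) whose key has that prefix.  Lookup is then three dict
-- # probes with precedence exact > alias > prefix.
-- _EXACT = {}
-- for _p in PLANETS:
--     _EXACT[''.join(ch for ch in _p.lower() if ch.isalnum())] = _p
--
-- _PREFIX = {}
-- for _p in PLANETS:
--     _k = ''.join(ch for ch in _p.lower() if ch.isalnum())
--     for _i in range(len(_k) + 1):
--         _PREFIX.setdefault(_k[:_i], _p)
--
--
-- def _normalize_planet(name: str) -> str | None: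
--     if not name:
--         return DEFAULT_PLANET
--
--     key = name.strip().lower()
--     if not key:
--         return DEFAULT_PLANET
--
--     clean = ''.join(ch for ch in key if ch.isalnum())
--
--     return _EXACT.get(clean) or PLANET_ALIASES.get(clean) or _PREFIX.get(clean)
-- ===== Notes on version B (the rewrite author's own statement) =====
-- stated objective: alternative
-- what changed: A's two early-return scans over PLANETS are replaced by dict lookups into two hash indexes built once at module load: an exact-key index and a prefix index that maps every prefix of every planet key to the first matching planet; the function body becomes three dict probes (exact, alias, prefix) with no loop over PLANETS.
import Mathlib
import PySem

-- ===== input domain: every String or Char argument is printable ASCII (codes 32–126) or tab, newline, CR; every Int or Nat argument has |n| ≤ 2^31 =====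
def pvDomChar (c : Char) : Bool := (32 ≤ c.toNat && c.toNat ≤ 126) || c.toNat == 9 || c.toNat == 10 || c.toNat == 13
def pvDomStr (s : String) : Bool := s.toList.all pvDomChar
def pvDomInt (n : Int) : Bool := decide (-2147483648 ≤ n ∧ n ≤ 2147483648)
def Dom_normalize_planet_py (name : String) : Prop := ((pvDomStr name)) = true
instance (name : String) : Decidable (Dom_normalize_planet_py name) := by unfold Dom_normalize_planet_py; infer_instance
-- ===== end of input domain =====

-- B replaces A's two early-return scans over PLANETS by lookups into two precomputed
-- hash indexes (exact-key dict and all-prefixes dict); same results, no per-call scan.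


-- ===== PORT A =====
def pvPlanets : List String :=
  ["Mercury", "Venus", "Earth", "Mars", "Jupiter", "Saturn", "Uranus", "Neptune"]

def pvAliases : PySem.Dict (List Char) String :=
  PySem.Dict.ofList
    [("terra".toList, "Earth"), ("gaia".toList, "Earth"), ("soliii".toList, "Earth"),
     ("tellus".toList, "Earth"), ("ares".toList, "Mars"), ("jove".toList, "Jupiter"),
     ("zeus".toList, "Jupiter"), ("cronus".toList, "Saturn"), ("ouranos".toList, "Uranus"),
     ("poseidon".toList, "Neptune")]

def pvDefaultPlanet : String := "Earth"

-- planet_key = ''.join(ch for ch in planet.lower() if ch.isalnum())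
def pvPlanetKey (p : String) : List Char :=
  (PySem.Chars.lower p.toList).filter PySem.Chars.isalnum

def normalize_planet_py (name : String) : Option String :=
  if name.toList = [] then some pvDefaultPlanet
  else
    let key := PySem.Chars.lower (PySem.Chars.strip name.toList)
    if key = [] then some pvDefaultPlanet
    else
      let clean := key.filter PySem.Chars.isalnum
      -- first loop: first planet with clean == planet_key or key == planet.lower()
      match pvPlanets.find?
          (fun p => clean == pvPlanetKey p || key == PySem.Chars.lower p.toList) with
      | some p => some p
      | none =>
        match pvAliases.get? clean with
        | some a => some a
        | none =>
          -- second loop: first planet whose key starts with clean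
          pvPlanets.find? (fun p => PySem.Chars.startswith (pvPlanetKey p) clean)

-- ===== PORT B =====
-- _EXACT = {key(p): p for p in PLANETS}  (built by a module-load loop in Source B)
def pvExact : PySem.Dict (List Char) String :=
  pvPlanets.foldl (fun d p => d.insert (pvPlanetKey p) p) PySem.Dict.empty

-- [k[:i] for i in range(len(k)+1)]  (k[:i] with 0 ≤ i is List.take i k, exact)
def pvPrefixes (k : List Char) : List (List Char) :=
  (List.range (k.length + 1)).map (fun i => k.take i)

-- _PREFIX: setdefault every prefix of every planet key to that planet
def pvPrefixIdx : PySem.Dict (List Char) String :=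
  pvPlanets.foldl
    (fun d p => (pvPrefixes (pvPlanetKey p)).foldl (fun d k => d.setdefault k p) d)
    PySem.Dict.empty

def normalize_planet_py_alt (name : String) : Option String :=
  if name.toList = [] then some pvDefaultPlanet
  else
    let key := PySem.Chars.lower (PySem.Chars.strip name.toList)
    if key = [] then some pvDefaultPlanet
    else
      let clean := key.filter PySem.Chars.isalnum
      -- _EXACT.get(clean) or PLANET_ALIASES.get(clean) or _PREFIX.get(clean)
      -- (all stored values are nonempty strings, so `or` is the first non-None)
      match pvExact.get? clean with
      | some p => some p
      | none =>
        match pvAliases.get? clean with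
        | some a => some a
        | none => pvPrefixIdx.get? clean

-- ===== PRECONDITION & SPEC =====
def Spec_normalize_planet_py (name : String) (out : Option String) : Prop := out = normalize_planet_py_alt name
instance (name : String) (out : Option String) : Decidable (Spec_normalize_planet_py name out) := by unfold Spec_normalize_planet_py; infer_instance

-- ===== CLAIM (what is proved, stated in full; the proofs are below) =====
def Claim_equal_normalize_planet_py : Prop := ∀ (name : String), Dom_normalize_planet_py name → Spec_normalize_planet_py name (normalize_planet_py name)

-- ===== LEMMAS AND PROOFS =====

-- In A's first loop, `key == planet.lower()` is subsumed by `clean == planet_key`: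
-- if key = planet.lower() then clean = key.filter(isalnum) = planet_key by definition.
lemma find_exact (key : List Char) :
    pvPlanets.find?
      (fun p => (key.filter PySem.Chars.isalnum) == pvPlanetKey p
        || key == PySem.Chars.lower p.toList)
      = pvPlanets.find? (fun p => (key.filter PySem.Chars.isalnum) == pvPlanetKey p) := by
  have h : (fun p => (key.filter PySem.Chars.isalnum) == pvPlanetKey p
        || key == PySem.Chars.lower p.toList)
      = (fun p => (key.filter PySem.Chars.isalnum) == pvPlanetKey p) := by
    funext p
    by_cases hk : key = PySem.Chars.lower p.toList
    · subst hk; unfold pvPlanetKey; simp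
    · simp [hk]
  rw [h]

-- B's exact dict computes A's first-loop search
lemma get?_mk_eq_find? (l : List (List Char × String)) (c : List Char) :
    (PySem.Dict.mk l).get? c = (l.find? (fun kv => kv.1 == c)).map (·.2) := by
  induction l with
  | nil => rfl
  | cons kv l ih =>
    rw [PySem.Dict.get?_mk_cons]
    by_cases h : (kv.1 == c) = true
    · simp [List.find?, h]
    · simp only [Bool.not_eq_true] at h
      simp [List.find?, h, ih]

lemma exact_dict (c : List Char) :
    pvExact.get? c = pvPlanets.find? (fun p => c == pvPlanetKey p) := by
  have flip : (fun p => c == pvPlanetKey p) = (fun p => pvPlanetKey p == c) := by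
    funext p
    by_cases hcx : c = pvPlanetKey p
    · rw [hcx]
    · rw [beq_eq_false_iff_ne.mpr hcx, beq_eq_false_iff_ne.mpr (fun e => hcx e.symm)]
  have h : pvExact = PySem.Dict.mk (pvPlanets.map (fun p => (pvPlanetKey p, p))) := by decide
  rw [flip, h, get?_mk_eq_find?, List.find?_map]
  simp [Function.comp_def]

-- get? through a setdefault loop over a list of keys sharing one value
lemma get?_setdefault_fold (L : List (List Char)) (v : String)
    (d : PySem.Dict (List Char) String) (c : List Char) :
    (L.foldl (fun d k => d.setdefault k v) d).get? c
      = (d.get? c).or (if c ∈ L then some v else none) := by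
  induction L generalizing d with
  | nil => simp
  | cons k L ih =>
    simp only [List.foldl_cons, ih]
    by_cases hc : d.contains k = true
    · rw [PySem.Dict.setdefault_of_contains d v hc]
      by_cases hck : c = k
      · subst hck
        have hs : (d.get? c).isSome := by
          rw [← PySem.Dict.contains_eq_isSome_get?]; exact hc
        cases hg : d.get? c with
        | none => rw [hg] at hs; simp at hs
        | some w => simp
      · simp [hck]
    · rw [PySem.Dict.setdefault_of_not_contains d v (by simpa using hc)]
      rw [PySem.Dict.get?_insert]
      by_cases hck : c = k
      · subst hck
        have hn : d.get? c = none := by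
          cases hg : d.get? c with
          | none => rfl
          | some w =>
            exact absurd (by rw [PySem.Dict.contains_eq_isSome_get?, hg]; rfl) hc
        simp [hn]
      · simp [hck]

lemma mem_prefixes (c k : List Char) : c ∈ pvPrefixes k ↔ c <+: k := by
  unfold pvPrefixes
  simp only [List.mem_map, List.mem_range]
  constructor
  · rintro ⟨i, hi, rfl⟩; exact List.take_prefix i k
  · intro h
    exact ⟨c.length, by have := h.length_le; omega, (List.prefix_iff_eq_take.mp h).symm⟩

-- the whole setdefault double loop computes the first-prefix-match search
lemma prefix_aux (l : List String) (d : PySem.Dict (List Char) String) (c : List Char) :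
    (l.foldl
        (fun d p => (pvPrefixes (pvPlanetKey p)).foldl (fun d k => d.setdefault k p) d)
        d).get? c
      = (d.get? c).or (l.find? (fun p => PySem.Chars.startswith (pvPlanetKey p) c)) := by
  induction l generalizing d with
  | nil => simp [List.find?]
  | cons p l ih =>
    simp only [List.foldl_cons, ih, get?_setdefault_fold, List.find?]
    by_cases h : c <+: pvPlanetKey p
    · have h1 : c ∈ pvPrefixes (pvPlanetKey p) := (mem_prefixes _ _).mpr h
      have h2 : PySem.Chars.startswith (pvPlanetKey p) c = true :=
        (PySem.Chars.startswith_iff _ _).mpr h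
      simp [h1, h2]
    · have h1 : c ∉ pvPrefixes (pvPlanetKey p) := fun hm => h ((mem_prefixes _ _).mp hm)
      have h2 : PySem.Chars.startswith (pvPlanetKey p) c = false := by
        rw [← Bool.not_eq_true, PySem.Chars.startswith_iff]; exact h
      simp [h1, h2]

-- B's prefix dict computes A's second-loop search
lemma prefix_dict (c : List Char) :
    pvPrefixIdx.get? c
      = pvPlanets.find? (fun p => PySem.Chars.startswith (pvPlanetKey p) c) := by
  unfold pvPrefixIdx
  rw [prefix_aux]
  simp

-- ===== VERDICT (by name: the statement is the Claim_ definition above) =====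
theorem normalize_planet_py_spec : Claim_equal_normalize_planet_py := by
  intro name _
  show normalize_planet_py name = normalize_planet_py_alt name
  unfold normalize_planet_py normalize_planet_py_alt
  by_cases h0 : name.toList = []
  · simp [h0]
  · simp only [h0, if_false]
    by_cases h1 : PySem.Chars.lower (PySem.Chars.strip name.toList) = []
    · simp [h1]
    · simp only [h1, if_false, find_exact, exact_dict, prefix_dict]
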